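-- pv_equiv track=rewrite | github.com/iamohmcub/backend-django-rest-api | logical_test.py | convertArabicToThai
-- ===== SOURCE A (Python) =====
-- def convertArabicToThai(input):
--     if input not in range(0, 10000000): return "out of range"
--
--     thaiWords = ["ศูนย์", "หนึ่ง", "สอง", "สาม", "สี่", "ห้า", "หก", "เจ็ด", "แปด", "เก้า"]
--     thaiUnits = ["", "สิบ", "ร้อย", "พัน","หมื่น","แสน","ล้าน"]
--
--     inputString = str(input)
--     inputLength = len(inputString)
--
--     if inputLength == 1: return thaiWords[input]
--
--     result = ""
--     for index in range(inputLength):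
--         indexNumber = int(index)
--         inputNumber = int(inputString[indexNumber])
--
--         word = thaiWords[inputNumber]
--         unit = thaiUnits[inputLength - indexNumber - 1]
--
--         if word == "ศูนย์": continue
--
--         word = checkLastIndex(inputLength, word, index)
--         word = checkSecondLastIndex(inputLength, word, index)
--
--         result += word + unit
--
--     return result
--
-- def checkLastIndex(inputLength, word , index):
--     if index == inputLength-1 and word == "หนึ่ง":
--         word = "เอ็ด"
--     return word
--
-- def checkSecondLastIndex(inputLength,word, index):
--     if index == inputLength-2:
--         if word == "หนึ่ง": word = ""
--         if word == "สอง": word = "ยี่"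
--     return word
-- ===== SOURCE B (Python) =====
-- def convertArabicToThai(input):
--     if not (0 <= input < 10000000):
--         return "out of range"
--
--     thaiWords = ["ศูนย์", "หนึ่ง", "สอง", "สาม", "สี่", "ห้า", "หก", "เจ็ด", "แปด", "เก้า"]
--     thaiUnits = ["", "สิบ", "ร้อย", "พัน", "หมื่น", "แสน", "ล้าน"]
--
--     if input < 10:
--         return thaiWords[input]
--
--     result = ""
--     n, pos = input, 0
--     while n > 0:
--         n, d = divmod(n, 10)
--         if d != 0:
--             if pos == 0 and d == 1:
--                 word = "เอ็ด"
--             elif pos == 1 and d == 1: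
--                 word = ""
--             elif pos == 1 and d == 2:
--                 word = "ยี่"
--             else:
--                 word = thaiWords[d]
--             result = word + thaiUnits[pos] + result
--         pos += 1
--     return result
-- ===== Notes on version B (the rewrite author's own statement) =====
-- stated objective: alternative
-- what changed: B drops the str()/len() digit-string left-to-right scan with length-relative unit lookup and instead extracts digits right-to-left by divmod(n,10), applying the position-based special cases (pos 0 digit 1 -> เอ็ด, pos 1 digit 1 dropped, pos 1 digit 2 -> ยี่) and prepending each word to the result.
import Mathlib
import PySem

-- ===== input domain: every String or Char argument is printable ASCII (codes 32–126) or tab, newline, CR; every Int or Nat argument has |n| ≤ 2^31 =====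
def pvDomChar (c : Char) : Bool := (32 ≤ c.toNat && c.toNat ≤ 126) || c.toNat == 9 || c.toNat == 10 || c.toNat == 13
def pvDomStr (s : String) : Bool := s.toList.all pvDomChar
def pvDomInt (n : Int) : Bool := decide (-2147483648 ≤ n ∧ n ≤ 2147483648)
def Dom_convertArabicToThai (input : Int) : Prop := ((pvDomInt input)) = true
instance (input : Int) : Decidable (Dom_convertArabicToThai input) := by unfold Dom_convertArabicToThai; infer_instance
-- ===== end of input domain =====

-- B replaces A's str()-based left-to-right digit-string scan by a right-to-left divmod digit
-- extraction that prepends each word (objective: alternative decomposition, no string conversion).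


-- the two word tables both Pythons write out verbatim
def pvThaiWords : List String := ["ศูนย์", "หนึ่ง", "สอง", "สาม", "สี่", "ห้า", "หก", "เจ็ด", "แปด", "เก้า"]
def pvThaiUnits : List String := ["", "สิบ", "ร้อย", "พัน", "หมื่น", "แสน", "ล้าน"]

-- ===== PORT A =====
def checkLastIndex (inputLength : Int) (word : String) (index : Int) : String :=
  if index = inputLength - 1 ∧ word = "หนึ่ง" then "เอ็ด" else word

def checkSecondLastIndex (inputLength : Int) (word : String) (index : Int) : String :=
  if index = inputLength - 2 then
    let word := if word = "หนึ่ง" then "" else word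
    if word = "สอง" then "ยี่" else word
  else word

def convertArabicToThai (input : Int) : String :=
  if ¬ (0 ≤ input ∧ input < 10000000) then "out of range"
  else
    let inputString : List Char := PySem.Int.toChars input
    let inputLength : Int := (inputString.length : Int)
    if inputLength = 1 then (PySem.List.pyGet? pvThaiWords input).getD ""
    else
      (PySem.List.pyRange 0 inputLength 1).foldl
        (fun result index =>
          let indexNumber : Int := index
          -- int(inputString[indexNumber]); index always in range and the char a digit,
          -- so the `.getD` fallbacks (Python's raise cases) are never taken
          let inputNumber : Int :=
            (PySem.Int.ofChars? [(PySem.List.pyGet? inputString indexNumber).getD ' ']).getD 0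
          let word := (PySem.List.pyGet? pvThaiWords inputNumber).getD ""
          let unit := (PySem.List.pyGet? pvThaiUnits (inputLength - indexNumber - 1)).getD ""
          if word = "ศูนย์" then result
          else
            let word := checkLastIndex inputLength word index
            let word := checkSecondLastIndex inputLength word index
            result ++ (word ++ unit))
        ""

-- ===== PORT B =====
-- while n > 0: n, d = divmod(n, 10); …  (divisor is the constant 10, so divmod never raises)
def altLoop (n : Int) (pos : Int) (result : String) : String :=
  if n ≤ 0 then result
  else
    let d := PySem.Int.mod n 10
    let n' := PySem.Int.floordiv n 10
    let result :=
      if d ≠ 0 then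
        (if pos = 0 ∧ d = 1 then "เอ็ด"
         else if pos = 1 ∧ d = 1 then ""
         else if pos = 1 ∧ d = 2 then "ยี่"
         else (PySem.List.pyGet? pvThaiWords d).getD "") ++
          (PySem.List.pyGet? pvThaiUnits pos).getD "" ++ result
      else result
    altLoop n' (pos + 1) result
termination_by n.toNat
decreasing_by
  rw [PySem.Int.floordiv_eq_ediv_of_pos (by omega : (0:Int) < 10)]
  omega

def convertArabicToThai_alt (input : Int) : String :=
  if ¬ (0 ≤ input ∧ input < 10000000) then "out of range"
  else if input < 10 then (PySem.List.pyGet? pvThaiWords input).getD ""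
  else altLoop input 0 ""

-- ===== PRECONDITION & SPEC =====
def Spec_convertArabicToThai (input : Int) (out : String) : Prop := out = convertArabicToThai_alt input
instance (input : Int) (out : String) : Decidable (Spec_convertArabicToThai input out) := by unfold Spec_convertArabicToThai; infer_instance

-- ===== CLAIM (what is proved, stated in full; the proofs are below) =====
def Claim_equal_convertArabicToThai : Prop := ∀ (input : Int), Dom_convertArabicToThai input → Spec_convertArabicToThai input (convertArabicToThai input)

-- ===== LEMMAS AND PROOFS =====

-- the word+unit text contributed by one digit d at decimal position pos (0 = units)
def piece (d pos : Nat) : String :=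
  if d = 0 then "" else
    (if pos = 0 ∧ d = 1 then "เอ็ด"
     else if pos = 1 ∧ d = 1 then ""
     else if pos = 1 ∧ d = 2 then "ยี่"
     else (PySem.List.pyGet? pvThaiWords (d : Int)).getD "") ++
      (PySem.List.pyGet? pvThaiUnits (pos : Int)).getD ""

-- text of a little-endian digit list starting at position pos
def pcat : List Nat → Nat → String
  | [], _ => ""
  | d :: ds, pos => pcat ds (pos + 1) ++ piece d pos

-- Nat.toDigitsCore facts -------------------------------------------------
lemma tdc_acc (b : Nat) : ∀ (f n : Nat) (l : List Char),
    Nat.toDigitsCore b f n l = Nat.toDigitsCore b f n [] ++ l := by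
  intro f
  induction f with
  | zero => intro n l; simp [Nat.toDigitsCore]
  | succ f ih =>
    intro n l
    simp only [Nat.toDigitsCore]
    by_cases h : n / b = 0
    · simp [h]
    · simp only [h, if_false]
      rw [ih (n / b) ((n % b).digitChar :: l), ih (n / b) [(n % b).digitChar]]
      simp

lemma tdc_fuel (b : Nat) (hb : 1 < b) : ∀ (f g n : Nat), n < f → n < g →
    Nat.toDigitsCore b f n [] = Nat.toDigitsCore b g n [] := by
  intro f
  induction f with
  | zero => omega
  | succ f ih =>
    intro g n hf hg
    cases g with
    | zero => omega
    | succ g =>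
      simp only [Nat.toDigitsCore]
      by_cases h : n / b = 0
      · simp [h]
      · simp only [h, if_false]
        rw [tdc_acc, tdc_acc b g]
        have hn : 0 < n := Nat.pos_of_ne_zero (by rintro rfl; exact h (Nat.zero_div b))
        have hd : n / b < n := Nat.div_lt_self hn hb
        rw [ih g (n / b) (by omega) (by omega)]

lemma toDigits_single {n : Nat} (h : n < 10) : Nat.toDigits 10 n = [Nat.digitChar n] := by
  have h1 : n / 10 = 0 := Nat.div_eq_of_lt h
  have h2 : n % 10 = n := Nat.mod_eq_of_lt h
  simp [Nat.toDigits, Nat.toDigitsCore, h1, h2]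

lemma toDigits_step {n : Nat} (h : 10 ≤ n) :
    Nat.toDigits 10 n = Nat.toDigits 10 (n / 10) ++ [Nat.digitChar (n % 10)] := by
  have h1 : n / 10 ≠ 0 := by
    intro h0; have := Nat.div_eq_of_lt (show n < 10 by omega); omega
  have h2 : 0 < n := by omega
  calc Nat.toDigits 10 n = Nat.toDigitsCore 10 (n + 1) n [] := rfl
    _ = Nat.toDigitsCore 10 n (n / 10) [(n % 10).digitChar] := by
          simp only [Nat.toDigitsCore, h1, if_false]
    _ = Nat.toDigitsCore 10 n (n / 10) [] ++ [(n % 10).digitChar] := tdc_acc 10 n (n / 10) _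
    _ = Nat.toDigitsCore 10 (n / 10 + 1) (n / 10) [] ++ [(n % 10).digitChar] := by
          rw [tdc_fuel 10 (by omega) n (n / 10 + 1) (n / 10) (by omega) (by omega)]
    _ = Nat.toDigits 10 (n / 10) ++ [Nat.digitChar (n % 10)] := rfl

lemma toDigits_eq_digits : ∀ (n : Nat), 0 < n →
    Nat.toDigits 10 n = ((Nat.digits 10 n).reverse).map Nat.digitChar := by
  intro n
  induction n using Nat.strong_induction_on with
  | _ n ih =>
    intro hn
    by_cases h : n < 10
    · rw [toDigits_single h, Nat.digits_def' (by omega) hn,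
        Nat.div_eq_of_lt h, Nat.mod_eq_of_lt h]
      simp
    · rw [toDigits_step (by omega), Nat.digits_def' (by omega : (1:Nat) < 10) hn,
        ih (n / 10) (by omega) (by omega)]
      simp

-- B side ----------------------------------------------------------------
lemma altLoop_eq : ∀ (m p : Nat) (r : String),
    altLoop (m : Int) (p : Int) r = pcat (Nat.digits 10 m) p ++ r := by
  intro m
  induction m using Nat.strong_induction_on with
  | _ m ih =>
    intro p r
    rw [altLoop]
    by_cases h0 : m = 0
    · subst h0; simp [pcat]
    · have hpos : 0 < m := Nat.pos_of_ne_zero h0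
      have hle : ¬ ((m : Int) ≤ 0) := by omega
      have hd : PySem.Int.mod (m : Int) 10 = ((m % 10 : Nat) : Int) := by
        rw [PySem.Int.mod_eq_emod_of_pos (by omega)]; omega
      have hq : PySem.Int.floordiv (m : Int) 10 = ((m / 10 : Nat) : Int) := by
        rw [PySem.Int.floordiv_eq_ediv_of_pos (by omega)]; omega
      have hp1 : ((p : Int) + 1) = ((p + 1 : Nat) : Int) := by push_cast; ring
      simp only [hle, if_false, hd, hq, hp1]
      rw [ih (m / 10) (by omega) (p + 1)]
      rw [Nat.digits_def' (by omega : (1:Nat) < 10) hpos]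
      simp only [pcat]
      by_cases hz : m % 10 = 0
      · simp [hz, piece]
      · have : ((m % 10 : Nat) : Int) ≠ 0 := by omega
        simp only [this, if_true, ne_eq, not_false_iff]
        have e1 : ((m : Int) % 10 = 1) ↔ (m % 10 = 1) := by omega
        have e2 : ((m : Int) % 10 = 2) ↔ (m % 10 = 2) := by omega
        simp [piece, hz, e1, e2, String.append_assoc]

-- A side ----------------------------------------------------------------
lemma ofChars_digitChar {d : Nat} (h : d < 10) :
    PySem.Int.ofChars? [Nat.digitChar d] = some (d : Int) := by
  interval_cases d <;> decide

set_option maxRecDepth 65536 in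
lemma bodyA (L i d : Nat) (r : String) (hd : d < 10) (hi : i < L) :
    (if (PySem.List.pyGet? pvThaiWords (d : Int)).getD "" = "ศูนย์" then r
     else r ++ (checkSecondLastIndex (L : Int)
        (checkLastIndex (L : Int) ((PySem.List.pyGet? pvThaiWords (d : Int)).getD "") (i : Int)) (i : Int) ++
        (PySem.List.pyGet? pvThaiUnits ((L : Int) - (i : Int) - 1)).getD ""))
    = r ++ piece d (L - 1 - i) := by
  have hpos : ((L : Int) - (i : Int) - 1) = ((L - 1 - i : Nat) : Int) := by omega
  have h1 : ((i : Int) = (L : Int) - 1) ↔ (L - 1 - i = 0) := by omega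
  have h2 : ((i : Int) = (L : Int) - 2) ↔ (L - 1 - i = 1) := by omega
  rw [hpos]
  generalize L - 1 - i = p at h1 h2 ⊢
  have w0 : (PySem.List.pyGet? pvThaiWords (0 : Int)).getD "" = "ศูนย์" := rfl
  have w1 : (PySem.List.pyGet? pvThaiWords (1 : Int)).getD "" = "หนึ่ง" := rfl
  have w2 : (PySem.List.pyGet? pvThaiWords (2 : Int)).getD "" = "สอง" := rfl
  have w3 : (PySem.List.pyGet? pvThaiWords (3 : Int)).getD "" = "สาม" := rfl
  have w4 : (PySem.List.pyGet? pvThaiWords (4 : Int)).getD "" = "สี่" := rfl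
  have w5 : (PySem.List.pyGet? pvThaiWords (5 : Int)).getD "" = "ห้า" := rfl
  have w6 : (PySem.List.pyGet? pvThaiWords (6 : Int)).getD "" = "หก" := rfl
  have w7 : (PySem.List.pyGet? pvThaiWords (7 : Int)).getD "" = "เจ็ด" := rfl
  have w8 : (PySem.List.pyGet? pvThaiWords (8 : Int)).getD "" = "แปด" := rfl
  have w9 : (PySem.List.pyGet? pvThaiWords (9 : Int)).getD "" = "เก้า" := rfl
  simp only [checkLastIndex, checkSecondLastIndex, piece, h1, h2]
  interval_cases d <;> by_cases hp0 : p = 0 <;> by_cases hp1 : p = 1 <;>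
    simp_all [Nat.cast_ofNat, Nat.cast_one]

lemma foldA_generic : ∀ (ds : List Nat) (k : Nat),
    (List.range ds.length).foldl (fun r i => r ++ piece (ds.getD i 0) (ds.length - 1 - i + k)) ""
      = pcat ds.reverse k := by
  intro ds
  induction ds using List.reverseRecOn with
  | nil => intro k; simp [pcat]
  | append_singleton ds d ih =>
    intro k
    rw [List.length_append, List.length_singleton, List.range_succ, List.foldl_append]
    rw [PySem.List.foldl_congr_mem (List.range ds.length) _
      (fun r i => r ++ piece (ds.getD i 0) (ds.length - 1 - i + (k + 1))) ""
      (by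
        intro acc i hi
        have hi' : i < ds.length := List.mem_range.mp hi
        rw [List.getD_append _ _ _ _ hi']
        congr 2
        omega)]
    rw [ih (k + 1)]
    have hlast : (ds ++ [d]).getD ds.length 0 = d := by simp [List.getD]
    have hpos : ds.length + 1 - 1 - ds.length + k = k := by omega
    simp only [List.foldl_cons, List.foldl_nil, hlast, hpos, List.reverse_append,
      List.reverse_singleton, List.singleton_append, pcat]

lemma pcat_of_ge_ten (m : Nat) (hm : 10 ≤ m) (hub : m < 10000000) :
    convertArabicToThai (m : Int) = pcat (Nat.digits 10 m) 0 := by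
  have hguard : ¬ ¬ (0 ≤ (m : Int) ∧ (m : Int) < 10000000) := by omega
  have hcs : PySem.Int.toChars (m : Int) = ((Nat.digits 10 m).reverse).map Nat.digitChar := by
    rw [PySem.Int.toChars]
    simp [toDigits_eq_digits m (by omega)]
  have hnil : Nat.digits 10 (m / 10) ≠ [] :=
    Nat.digits_ne_nil_iff_ne_zero.mpr (by omega)
  have hL2 : 2 ≤ ((Nat.digits 10 m).reverse).length := by
    rw [List.length_reverse, Nat.digits_def' (by omega : (1:Nat) < 10) (by omega)]
    cases h : Nat.digits 10 (m / 10) with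
    | nil => exact absurd h hnil
    | cons a l => simp
  rw [convertArabicToThai]
  simp only [hguard, if_false, hcs, List.length_map]
  have hL1 : ¬ ((((Nat.digits 10 m).reverse).length : Int) = 1) := by omega
  simp only [hL1, if_false]
  rw [PySem.List.pyRange_zero_natCast, List.foldl_map]
  rw [PySem.List.foldl_congr_mem _ _
    (fun r i => r ++ piece (((Nat.digits 10 m).reverse).getD i 0)
      (((Nat.digits 10 m).reverse).length - 1 - i + 0)) ""
    (by
      intro acc i hi
      have hi' : i < ((Nat.digits 10 m).reverse).length := List.mem_range.mp hi
      have hgd : PySem.List.pyGet? (((Nat.digits 10 m).reverse).map Nat.digitChar) (i : Int)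
          = some (Nat.digitChar (((Nat.digits 10 m).reverse).getD i 0)) := by
        rw [PySem.List.pyGet?_natCast]
        rw [List.getElem?_eq_getElem (by simpa using hi')]
        rw [List.getElem_map, List.getD_eq_getElem _ _ hi']
      have hdlt : ((Nat.digits 10 m).reverse).getD i 0 < 10 := by
        rw [List.getD_eq_getElem _ _ hi']
        have hmem : ((Nat.digits 10 m).reverse)[i] ∈ (Nat.digits 10 m).reverse :=
          List.getElem_mem hi'
        exact Nat.digits_lt_base (by omega) (List.mem_reverse.mp hmem)
      simp only [hgd, Option.getD_some, ofChars_digitChar hdlt, Nat.add_zero]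
      exact bodyA _ i _ acc hdlt hi')]
  rw [foldA_generic, List.reverse_reverse]

lemma toChars_small {m : Nat} (hm : m < 10) :
    PySem.Int.toChars (m : Int) = [Nat.digitChar m] := by
  rw [PySem.Int.toChars]
  simp [toDigits_single hm]

-- ===== VERDICT (by name: the statement is the Claim_ definition above) =====
theorem convertArabicToThai_spec : Claim_equal_convertArabicToThai := by
  intro input _
  unfold Spec_convertArabicToThai
  by_cases hr : 0 ≤ input ∧ input < 10000000
  · obtain ⟨h0, h1⟩ := hr
    obtain ⟨m, rfl⟩ : ∃ m : Nat, input = (m : Int) :=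
      ⟨input.toNat, (Int.toNat_of_nonneg h0).symm⟩
    by_cases hm : m < 10
    · have hlt : (m : Int) < 10 := by omega
      rw [convertArabicToThai, convertArabicToThai_alt]
      simp only [toChars_small hm]
      simp [h0, h1, hlt]
    · have hge : ¬ ((m : Int) < 10) := by omega
      rw [pcat_of_ge_ten m (by omega) (by omega), convertArabicToThai_alt]
      have hguard : ¬ ¬ (0 ≤ (m : Int) ∧ (m : Int) < 10000000) := by omega
      simp only [hguard, if_false, hge]
      have := altLoop_eq m 0 ""
      simp only [Nat.cast_zero] at this
      rw [this, String.append_empty]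
  · simp [convertArabicToThai, convertArabicToThai_alt, hr]
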